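-- pv_equiv track=rewrite | github.com/Haymanot-Demis/A2SV-Problems | Sources and Sinks.py | sourcesAndSinks
-- ===== SOURCE A (Python) =====
-- def sourcesAndSinks(nodes, adjacency_matrix):
--     sources = []
--     sinks = []
--     for i in range(nodes):
--         if sum(adjacency_matrix[i]) == 0:
--             sinks.append(i + 1)
--     j = 1
--     for column in zip(*adjacency_matrix):
--         if sum(list(column)) == 0:
--             sources.append(j)
--         j += 1
--     return sources, sinks
-- ===== SOURCE B (Python) =====
-- def sourcesAndSinks(nodes, adjacency_matrix):
--     sinks = [i + 1 for i in range(nodes) if sum(adjacency_matrix[i]) == 0]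
--     col_sums = []
--     if adjacency_matrix:
--         col_sums = list(adjacency_matrix[0])
--         for row in adjacency_matrix[1:]:
--             col_sums = [c + x for c, x in zip(col_sums, row)]
--     sources = [j + 1 for j, s in enumerate(col_sums) if s == 0]
--     return sources, sinks
-- ===== Notes on version B (the rewrite author's own statement) =====
-- stated objective: alternative
-- what changed: B never materializes the transpose: instead of A's zip(*matrix) pass with a manual counter, it folds the rows into a running column-sum vector (elementwise zip-add) and reads the sources off that vector; Pre_ excludes only inputs where A raises IndexError (nodes > number of rows).
import Mathlib
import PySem

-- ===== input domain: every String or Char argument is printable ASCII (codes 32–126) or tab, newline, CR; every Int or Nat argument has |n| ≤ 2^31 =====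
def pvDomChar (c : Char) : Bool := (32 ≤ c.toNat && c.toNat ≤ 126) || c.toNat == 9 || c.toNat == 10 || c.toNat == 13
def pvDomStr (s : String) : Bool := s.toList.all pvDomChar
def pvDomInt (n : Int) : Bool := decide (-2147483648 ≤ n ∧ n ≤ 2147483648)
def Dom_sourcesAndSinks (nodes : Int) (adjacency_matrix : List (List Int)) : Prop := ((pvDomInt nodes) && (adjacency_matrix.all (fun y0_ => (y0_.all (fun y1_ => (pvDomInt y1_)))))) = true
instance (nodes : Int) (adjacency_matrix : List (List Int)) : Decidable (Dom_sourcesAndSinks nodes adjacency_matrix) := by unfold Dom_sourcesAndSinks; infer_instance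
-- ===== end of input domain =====

-- B drops A's zip(*matrix) transpose pass with its manual counter and instead folds the
-- rows into a running column-sum vector, reading the sources off it (objective: alternative).

-- ===== PORT A =====

-- length of the shortest row (0 for no rows): the number of tuples zip(*rows) yields
def pyMinLen (rows : List (List Int)) : Nat :=
  match rows with
  | [] => 0
  | r :: rs => rs.foldl (fun a l => min a l.length) r.length

-- zip(*rows): the j-th tuple holds row[j] for every row, for j below every row's length
def pyZipStar (rows : List (List Int)) : List (List Int) :=
  (List.range (pyMinLen rows)).map (fun j => rows.map (fun r => r.getD j 0))

def sourcesAndSinks (nodes : Int) (adjacency_matrix : List (List Int)) : List Int × List Int :=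
  let sinks := (PySem.List.pyRange 0 nodes 1).foldl
    (fun acc i => if (PySem.List.pyGetD adjacency_matrix i []).sum = 0 then acc ++ [i + 1] else acc) []
  let p := (pyZipStar adjacency_matrix).foldl
    (fun (st : List Int × Int) column =>
      ((if column.sum = 0 then st.1 ++ [st.2] else st.1), st.2 + 1)) ([], 1)
  (p.1, sinks)

-- ===== PORT B =====
-- the 'if adjacency_matrix: col_sums = list(first row); for row in rest: zip-add' block
def pyColSums : List (List Int) → List Int
  | [] => []
  | r :: rs => rs.foldl (fun c row => (c.zip row).map (fun p => p.1 + p.2)) r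

def sourcesAndSinks_alt (nodes : Int) (adjacency_matrix : List (List Int)) : List Int × List Int :=
  let sinks := ((PySem.List.pyRange 0 nodes 1).filter
      (fun i => (PySem.List.pyGetD adjacency_matrix i []).sum == 0)).map (fun i => i + 1)
  let col_sums := pyColSums adjacency_matrix
  let sources := ((PySem.List.enumerate col_sums 0).filter (fun p => p.2 == 0)).map
      (fun p => p.1 + 1)
  (sources, sinks)

-- ===== PRECONDITION & SPEC =====
-- Pre_ excludes exactly the inputs where A raises IndexError: nodes larger than the number of rows.
def Pre_sourcesAndSinks (nodes : Int) (adjacency_matrix : List (List Int)) : Prop :=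
  nodes ≤ (adjacency_matrix.length : Int)
instance (nodes : Int) (adjacency_matrix : List (List Int)) : Decidable (Pre_sourcesAndSinks nodes adjacency_matrix) := by unfold Pre_sourcesAndSinks; infer_instance

def pvWitness_sourcesAndSinks : Int × List (List Int) := (2, [[0, 1], [0, 0]])

def Spec_sourcesAndSinks (nodes : Int) (adjacency_matrix : List (List Int)) (out : List Int × List Int) : Prop := out = sourcesAndSinks_alt nodes adjacency_matrix
instance (nodes : Int) (adjacency_matrix : List (List Int)) (out : List Int × List Int) : Decidable (Spec_sourcesAndSinks nodes adjacency_matrix out) := by unfold Spec_sourcesAndSinks; infer_instance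

-- ===== CLAIM (what is proved, stated in full; the proofs are below) =====
def Claim_equal_sourcesAndSinks : Prop := ∀ (nodes : Int) (adjacency_matrix : List (List Int)), Dom_sourcesAndSinks nodes adjacency_matrix → Pre_sourcesAndSinks nodes adjacency_matrix → Spec_sourcesAndSinks nodes adjacency_matrix (sourcesAndSinks nodes adjacency_matrix)

-- ===== LEMMAS AND PROOFS =====

-- the accumulated sum of column j over all rows (entries beyond a row's end read as 0;
-- only used for j below every row's length)
def colS (adjm : List (List Int)) (j : Nat) : Int := (adjm.map (fun r => r.getD j 0)).sum

theorem map_getD_range (c : List Int) :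
    (List.range c.length).map (fun j => c.getD j 0) = c := by
  apply List.ext_getElem
  · simp
  · intro i h1 h2
    simp [List.getD_eq_getElem?_getD, List.getElem?_eq_getElem h2]

-- getD of an elementwise zip-sum, below the common length
theorem getD_zip_add (c row : List Int) (j : Nat) (hj : j < min c.length row.length) :
    ((c.zip row).map (fun p => p.1 + p.2)).getD j 0 = c.getD j 0 + row.getD j 0 := by
  have hc : j < c.length := by omega
  have hr : j < row.length := by omega
  have hz : j < ((c.zip row).map (fun p => p.1 + p.2)).length := by simp; omega
  rw [List.getD_eq_getElem?_getD, List.getElem?_eq_getElem hz]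
  simp [List.getElem_zip, List.getD_eq_getElem?_getD,
        List.getElem?_eq_getElem hc, List.getElem?_eq_getElem hr]

-- foldl of min never exceeds its initial value
theorem foldl_min_le (rs : List (List Int)) (a : Nat) :
    rs.foldl (fun a l => min a l.length) a ≤ a := by
  induction rs generalizing a with
  | nil => simp
  | cons x xs ih => exact le_trans (ih (min a x.length)) (min_le_left _ _)

-- B's row fold computes, for each column below the shortest length seen, the running sums
theorem zipfold_char (rs : List (List Int)) :
    ∀ (c : List Int),
    rs.foldl (fun c' row => (c'.zip row).map (fun p => p.1 + p.2)) c
      = (List.range (rs.foldl (fun a l => min a l.length) c.length)).map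
          (fun j => c.getD j 0 + (rs.map (fun r => r.getD j 0)).sum) := by
  induction rs with
  | nil =>
    intro c
    simpa using (map_getD_range c).symm
  | cons row rs ih =>
    intro c
    rw [List.foldl_cons, ih]
    have hlen : ((c.zip row).map (fun p : Int × Int => p.1 + p.2)).length
        = min c.length row.length := by simp
    rw [hlen]
    have hb := foldl_min_le rs (min c.length row.length)
    apply List.map_congr_left
    intro j hj
    have hj' : j < min c.length row.length := lt_of_lt_of_le (List.mem_range.mp hj) hb
    rw [getD_zip_add c row j hj']
    simp
    ring

-- A's source loop with its running counter, characterised via enumerate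
theorem counter_fold (l : List (List Int)) (a : List Int) (j : Int) :
    l.foldl (fun st column => ((if column.sum = 0 then st.1 ++ [st.2] else st.1), st.2 + 1)) (a, j)
      = (a ++ ((PySem.List.enumerate l j).filter (fun p => decide (p.2.sum = 0))).map (fun p => p.1),
         j + l.length) := by
  induction l generalizing a j with
  | nil => simp
  | cons x xs ih =>
    rw [List.foldl_cons, ih, PySem.List.enumerate_cons]
    by_cases h : x.sum = 0 <;>
      simp [h, List.append_assoc] <;> ring

theorem enum_map_range {α : Type} (f : Nat → α) (m : Nat) (s : Int) :
    PySem.List.enumerate ((List.range m).map f) s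
      = (List.range m).map (fun (k : Nat) => (s + (k : Int), f k)) := by
  induction m generalizing f s with
  | zero => rfl
  | succ n ih =>
    rw [List.range_succ_eq_map]
    simp only [List.map_cons, List.map_map, PySem.List.enumerate_cons]
    rw [show ((List.range n).map (f ∘ Nat.succ)) = ((List.range n).map (fun k => (f ∘ Nat.succ) k)) from rfl]
    rw [ih (f ∘ Nat.succ) (s + 1)]
    refine List.cons_eq_cons.mpr ⟨by simp, ?_⟩
    apply List.map_congr_left
    intro k _
    simp only [Function.comp, Prod.mk.injEq]
    refine ⟨by push_cast; ring, trivial⟩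

-- decide (x = y) and Int's == coincide
theorem decide_eq_beq (x y : Int) : decide (x = y) = (x == y) := by
  by_cases h : x = y <;> simp [h]

-- Prop-conditioned variant of PySem.List.foldl_append_if
theorem foldl_append_if_prop {α : Type} (p : α → Prop) [DecidablePred p] (f : α → Int)
    (l : List α) (acc : List Int) :
    l.foldl (fun acc x => if p x then acc ++ [f x] else acc) acc
      = acc ++ (l.filter (fun x => decide (p x))).map f := by
  rw [← PySem.List.foldl_append_if (fun x => decide (p x)) f l acc]
  simp only [decide_eq_true_eq]

-- ===== VERDICT (by name: the statement is the Claim_ definition above) =====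
theorem sourcesAndSinks_spec : Claim_equal_sourcesAndSinks := by
  intro nodes adjm _ hpre
  unfold Spec_sourcesAndSinks sourcesAndSinks sourcesAndSinks_alt
  dsimp only
  refine Prod.ext ?_ ?_
  · -- sources
    dsimp only
    rw [counter_fold (pyZipStar adjm) [] 1]
    dsimp only
    rw [show pyZipStar adjm
          = (List.range (pyMinLen adjm)).map (fun j => adjm.map (fun r => r.getD j 0)) from rfl]
    rw [enum_map_range (fun j => adjm.map (fun r => r.getD j 0)) (pyMinLen adjm) 1,
        List.filter_map, List.map_map]
    simp only [List.nil_append]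
    cases adjm with
    | nil => rfl
    | cons r rs =>
      rw [show pyColSums (r :: rs)
            = rs.foldl (fun c row => (c.zip row).map (fun p => p.1 + p.2)) r from rfl]
      rw [zipfold_char rs r]
      rw [show rs.foldl (fun a l => min a l.length) r.length = pyMinLen (r :: rs) from rfl]
      rw [enum_map_range (fun j => r.getD j 0 + (rs.map (fun rr => rr.getD j 0)).sum)
            (pyMinLen (r :: rs)) 0, List.filter_map, List.map_map]
      have hfil : (List.range (pyMinLen (r :: rs))).filter
            ((fun p : Int × List Int => decide (p.2.sum = 0)) ∘
              (fun k : Nat => (1 + (k : Int), (r :: rs).map (fun rr => rr.getD k 0))))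
          = (List.range (pyMinLen (r :: rs))).filter
            ((fun p : Int × Int => p.2 == 0) ∘
              (fun k : Nat => ((k : Int), r.getD k 0 + (rs.map (fun rr => rr.getD k 0)).sum))) := by
        apply List.filter_congr
        intro k _
        simp only [Function.comp_apply, List.map_cons, List.sum_cons]
        exact decide_eq_beq _ _
      rw [hfil]
      apply List.map_congr_left
      intro k _
      simp only [Function.comp_apply]
      omega
  · -- sinks
    dsimp only
    rw [foldl_append_if_prop (fun i : Int => (PySem.List.pyGetD adjm i []).sum = 0)
          (fun i => i + 1) (PySem.List.pyRange 0 nodes 1) []]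
    simp only [List.nil_append]
    congr 1
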